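-- pv_equiv track=rewrite | github.com/tal66/aoc | aoc12/aoc.py | bf
-- ===== SOURCE A (Python) =====
-- def bf(record, nums) -> int:
--     if "?" not in record:
--         if check_translation(record, nums):
--             return 1
--         else:
--             return 0
--
--     result = 0
--     i = record.index("?")
--
--     record[i] = "#"
--     result += bf(record, nums)
--     record[i] = "."
--     result += bf(record, nums)
--     record[i] = "?"
--
--     return result
--
-- def check_translation(record: list, nums: list) -> bool:
--     idx = 0
--     i = 0
--     while i < len(record):
--         count = 0
--         c = record[i]
--         while c == "#":
--             count += 1
--             i += 1
--             if i == len(record):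
--                 break
--             c = record[i]
--
--         if count > 0:
--             if idx == len(nums):
--                 return False
--             if count != nums[idx]:
--                 return False
--             idx += 1
--             i -= 1
--         i += 1
--
--     return idx == len(nums)
-- ===== SOURCE B (Python) =====
-- def bf(record, nums) -> int:
--     # Single left-to-right scan carrying (current '#'-run length, next expected group index);
--     # iterates over forced cells and branches (recurses) only at '?', pruning any prefix
--     # whose completed run mismatches nums immediately.
--     m = len(nums)
--     n = len(record)
--
--     def go(i, run, idx):
--         total = 0
--         while i < n:
--             c = record[i]
--             i += 1
--             if c == "?":
--                 total += go(i, run + 1, idx)  # choose '#'; the '.' choice falls through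
--                 c = "."
--             if c == "#":
--                 run += 1
--             elif run > 0:
--                 if idx < m and nums[idx] == run:
--                     run, idx = 0, idx + 1
--                 else:
--                     return total
--         if run > 0:
--             return total + (1 if idx < m and nums[idx] == run and idx + 1 == m else 0)
--         return total + (1 if idx == m else 0)
--
--     return go(0, 0, 0)
-- ===== Notes on version B (the rewrite author's own statement) =====
-- stated objective: faster
-- what changed: Replaces A's exponential enumeration of all 2^q substitutions of the '?' cells with a single left-to-right recursive scan carrying (current '#'-run length, next expected group index) that prunes any prefix whose run mismatches nums immediately.
import Mathlib
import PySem

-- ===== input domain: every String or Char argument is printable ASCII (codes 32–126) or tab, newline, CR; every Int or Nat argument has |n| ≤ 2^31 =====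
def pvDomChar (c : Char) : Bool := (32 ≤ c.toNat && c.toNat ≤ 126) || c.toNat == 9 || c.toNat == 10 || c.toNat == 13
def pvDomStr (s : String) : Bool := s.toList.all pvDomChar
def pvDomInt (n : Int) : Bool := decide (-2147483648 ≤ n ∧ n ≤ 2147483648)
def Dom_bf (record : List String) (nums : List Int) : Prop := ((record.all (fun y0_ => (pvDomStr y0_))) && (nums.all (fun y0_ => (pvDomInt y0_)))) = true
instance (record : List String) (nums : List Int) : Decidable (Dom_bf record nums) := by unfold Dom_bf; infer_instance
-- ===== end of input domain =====

-- B replaces A's 2^q brute-force substitution of the '?' cells by a single left-to-right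
-- scan carrying (current '#'-run length, next group index), pruning mismatching runs early.
-- A mutates `record` in place but restores it before returning; the claim is about the return value.

-- ===== PORT A =====
-- ctRunLen = the inner `while c == "#"` loop: length of the leading run of "#".
def ctRunLen : List String → Nat
  | [] => 0
  | c :: r => if c = "#" then ctRunLen r + 1 else 0

-- check_translation: the outer while-loop as structural recursion; after consuming a run of
-- k+1 '#'s the Python resumes at the first non-'#' char (the i -= 1; i += 1 dance), i.e. at
-- rest.drop k.  idx stays in [0, len nums] so pyGetD nums idx 0 is exact (never the default).
def checkTranslation (nums : List Int) : List String → Int → Bool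
  | [], idx => idx == (nums.length : Int)
  | c :: rest, idx =>
    if c = "#" then
      let k := ctRunLen rest
      if idx == (nums.length : Int) then false
      else if ((k : Int) + 1) != PySem.List.pyGetD nums idx 0 then false
      else checkTranslation nums (rest.drop k) (idx + 1)
    else checkTranslation nums rest idx
termination_by rest => rest.length
decreasing_by
  · simp [List.length_drop]
  · simp

-- used by bf's decreasing_by
theorem pv_count_set_lt (l : List String) (x : String) (hx : ¬ x = "?") (h : "?" ∈ l) :
    (l.set (l.idxOf "?") x).count "?" < l.count "?" := by
  induction l with
  | nil => cases h
  | cons c r ih =>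
    by_cases hc : c = "?"
    · subst hc
      simp [List.idxOf_cons_self, List.count_cons]
      simp [hx]
    · have hm : "?" ∈ r := by
        cases h with
        | head => exact absurd rfl hc
        | tail _ h' => exact h'
      have : (c :: r).idxOf "?" = r.idxOf "?" + 1 := by
        simp [List.idxOf_cons]
        have : (c == "?") = false := by simpa using hc
        simp [this]
      rw [this]
      simp only [List.set_cons_succ, List.count_cons]
      have := ih hm
      omega

def bf (record : List String) (nums : List Int) : Int :=
  if h : "?" ∈ record then
    let i := record.idxOf "?"
    bf (record.set i "#") nums + bf (record.set i ".") nums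
  else
    if checkTranslation nums record 0 then 1 else 0
termination_by record.count "?"
decreasing_by
  · exact pv_count_set_lt record "#" (by decide) h
  · exact pv_count_set_lt record "." (by decide) h

-- ===== PORT B =====
-- go(i, run, idx) from Source B: the while-loop over forced cells is the tail recursion on i,
-- `total` is the accumulator; it recurses non-tail only at a "?" cell.  m = len(nums);
-- 0 ≤ i < n so record[i] is List.getD exactly, and the guarded nums[idx] is pyGetD exactly.
def goB (record : List String) (nums : List Int) (m : Int) (i : Nat) (run idx total : Int) : Int :=
  if h : i < record.length then
    let c := record.getD i ""
    if c = "?" then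
      let total' := total + goB record nums m (i + 1) (run + 1) idx 0
      -- fall through with c = "." (never "#")
      if run > 0 then
        if idx < m ∧ PySem.List.pyGetD nums idx 0 = run then
          goB record nums m (i + 1) 0 (idx + 1) total'
        else total'
      else goB record nums m (i + 1) run idx total'
    else if c = "#" then goB record nums m (i + 1) (run + 1) idx total
    else if run > 0 then
      if idx < m ∧ PySem.List.pyGetD nums idx 0 = run then
        goB record nums m (i + 1) 0 (idx + 1) total
      else total
    else goB record nums m (i + 1) run idx total
  else
    if run > 0 then
      total + (if idx < m ∧ PySem.List.pyGetD nums idx 0 = run ∧ idx + 1 = m then 1 else 0)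
    else
      total + (if idx = m then 1 else 0)
termination_by record.length - i

def bf_alt (record : List String) (nums : List Int) : Int :=
  goB record nums (nums.length : Int) 0 0 0 0

-- ===== PRECONDITION & SPEC =====
def Spec_bf (record : List String) (nums : List Int) (out : Int) : Prop := out = bf_alt record nums
instance (record : List String) (nums : List Int) (out : Int) : Decidable (Spec_bf record nums out) := by unfold Spec_bf; infer_instance

-- ===== CLAIM (what is proved, stated in full; the proofs are below) =====
def Claim_equal_bf : Prop := ∀ (record : List String) (nums : List Int), Dom_bf record nums → Spec_bf record nums (bf record nums)

-- ===== LEMMAS AND PROOFS =====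

-- proof-side reformulation of B's scan: structural recursion over the record list
def bfGo (nums : List Int) (m : Int) : List String → Int → Int → Int
  | [], run, idx =>
    if run > 0 then
      if idx < m ∧ PySem.List.pyGetD nums idx 0 = run ∧ idx + 1 = m then 1 else 0
    else
      if idx = m then 1 else 0
  | c :: rest, run, idx =>
    (if c = "#" ∨ c = "?" then bfGo nums m rest (run + 1) idx else 0)
    + (if ¬ c = "#" then
         (if run > 0 then
            (if idx < m ∧ PySem.List.pyGetD nums idx 0 = run then bfGo nums m rest 0 (idx + 1) else 0)
          else bfGo nums m rest 0 idx)
       else 0)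

-- goB on the suffix from i is `total +` bfGo on that suffix (for the reachable runs 0 ≤ run)
theorem pv_goB_bfGo (record : List String) (nums : List Int) (m : Int) :
    ∀ (k i : Nat) (run idx total : Int), record.length - i ≤ k → 0 ≤ run →
      goB record nums m i run idx total = total + bfGo nums m (record.drop i) run idx := by
  intro k
  induction k with
  | zero =>
    intro i run idx total hk h0run
    have hge : record.length ≤ i := by omega
    have hnd : record.drop i = [] := List.drop_eq_nil_of_le hge
    rw [goB, dif_neg (by omega), hnd]
    simp only [bfGo]
    split_ifs <;> ring
  | succ k ihk =>
    intro i run idx total hk h0run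
    by_cases h : i < record.length
    · have hd : record.drop i = record[i] :: record.drop (i + 1) := List.drop_eq_getElem_cons h
      have hgd : record.getD i "" = record[i] := List.getD_eq_getElem record "" h
      have ihx : ∀ (run idx total : Int), 0 ≤ run →
          goB record nums m (i + 1) run idx total = total + bfGo nums m (record.drop (i + 1)) run idx :=
        fun run idx total h0 => ihk (i + 1) run idx total (by omega) h0
      rw [goB, dif_pos h]
      simp only [hgd, hd]
      by_cases hq : record[i] = "?"
      · simp only [hq, if_pos rfl, bfGo]
        rw [ihx (run + 1) idx 0 (by omega)]
        by_cases hr : run > 0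
        · by_cases hg : idx < m ∧ PySem.List.pyGetD nums idx 0 = run
          · rw [if_pos hr, if_pos hg, ihx 0 (idx + 1) _ (by omega)]
            simp [hr, hg]
            ring
          · rw [if_pos hr, if_neg hg]
            simp [hr, hg]
        · have hr0 : run = 0 := by omega
          rw [if_neg hr, ihx run idx _ h0run]
          simp [hr, hr0]
          ring
      · by_cases hh : record[i] = "#"
        · simp only [hq, hh, if_neg (by simp [hq] : ¬ record[i] = "?"), if_pos rfl, bfGo]
          rw [ihx (run + 1) idx total (by omega)]
          simp [hh, hq]
        · simp only [if_neg hq, if_neg hh, bfGo]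
          have hcb : ¬ (record[i] = "#" ∨ record[i] = "?") := by tauto
          by_cases hr : run > 0
          · by_cases hg : idx < m ∧ PySem.List.pyGetD nums idx 0 = run
            · rw [if_pos hr, if_pos hg, ihx 0 (idx + 1) total (by omega)]
              simp [hcb, hh, hq, hr, hg]
            · rw [if_pos hr, if_neg hg]
              simp [hcb, hh, hq, hr, hg]
          · have hr0 : run = 0 := by omega
            rw [if_neg hr, ihx run idx total h0run]
            simp [hcb, hh, hq, hr, hr0]
    · have hnd : record.drop i = [] := List.drop_eq_nil_of_le (by omega)
      rw [goB, dif_neg h, hnd]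
      simp only [bfGo]
      split_ifs <;> ring

theorem pv_alt_eq (record : List String) (nums : List Int) :
    bf_alt record nums = bfGo nums (nums.length : Int) record 0 0 := by
  unfold bf_alt
  rw [pv_goB_bfGo record nums (nums.length : Int) record.length 0 0 0 0 (by omega) (le_refl 0)]
  simp

-- On '?'-free records, bfGo with run 0 is the indicator of checkTranslation (statement 1),
-- and bfGo inside a run of length `run` is the indicator of "close the run against nums[idx]
-- and continue" (statement 2).  Proved together by strong induction on the list length.
-- unfolding checkTranslation on a record starting with "#", in indicator form
theorem pv_check_hash (nums : List Int) (r : List String) (idx : Int) :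
    (if checkTranslation nums ("#" :: r) idx then (1:Int) else 0)
      = if idx = (nums.length : Int) then 0
        else if ¬ ((ctRunLen r : Int) + 1) = PySem.List.pyGetD nums idx 0 then 0
        else if checkTranslation nums (r.drop (ctRunLen r)) (idx + 1) then 1 else 0 := by
  by_cases h1 : idx = (nums.length : Int)
  · simp [checkTranslation, h1]
  · by_cases hg : ((ctRunLen r : Int) + 1) = PySem.List.pyGetD nums idx 0
    · simp [checkTranslation, h1, hg]
    · simp [checkTranslation, h1, hg]

-- the [] case of statement 2 below, shared
theorem pv_nil2 (nums : List Int) (idx run : Int) (h0 : 0 ≤ idx) (hM : idx ≤ (nums.length : Int))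
    (hrun : 1 ≤ run) :
    bfGo nums (nums.length : Int) [] run idx
      = if idx = (nums.length : Int) then 0
        else if ¬ (run + (ctRunLen ([] : List String) : Int)) = PySem.List.pyGetD nums idx 0 then 0
        else if checkTranslation nums (([] : List String).drop (ctRunLen ([] : List String))) (idx + 1) then 1 else 0 := by
  have hpos : run > 0 := by omega
  simp only [bfGo, ctRunLen, Nat.cast_zero, add_zero, List.drop_nil, checkTranslation,
    beq_iff_eq, if_pos hpos]
  split_ifs <;> omega

-- On '?'-free records, bfGo with run 0 is the indicator of checkTranslation (statement 1),
-- and bfGo inside a run of length `run` is the indicator of "close the run against nums[idx]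
-- and continue" (statement 2).  Proved together by strong induction on the list length.
theorem pv_go_check (nums : List Int) :
    ∀ n rest, rest.length ≤ n → rest.count "?" = 0 →
      (∀ idx : Int, 0 ≤ idx → idx ≤ (nums.length : Int) →
        bfGo nums (nums.length : Int) rest 0 idx
          = if checkTranslation nums rest idx then 1 else 0) ∧
      (∀ idx run : Int, 0 ≤ idx → idx ≤ (nums.length : Int) → 1 ≤ run →
        bfGo nums (nums.length : Int) rest run idx
          = if idx = (nums.length : Int) then 0
            else if ¬ (run + (ctRunLen rest : Int)) = PySem.List.pyGetD nums idx 0 then 0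
            else if checkTranslation nums (rest.drop (ctRunLen rest)) (idx + 1) then 1 else 0) := by
  intro n
  induction n with
  | zero =>
    intro rest hlen hq
    have hr : rest = [] := List.length_eq_zero_iff.mp (Nat.le_zero.mp hlen)
    subst hr
    exact ⟨fun idx h0 hM => by simp [bfGo, checkTranslation],
           fun idx run h0 hM hrun => pv_nil2 nums idx run h0 hM hrun⟩
  | succ n ih =>
    intro rest hlen hq
    constructor
    · intro idx h0 hM
      match rest with
      | [] => simp [bfGo, checkTranslation]
      | c :: r =>
        have hc? : ¬ c = "?" := by
          intro hc; subst hc; simp [List.count_cons] at hq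
        have hqr : r.count "?" = 0 := by
          simp only [List.count_cons] at hq; omega
        have hlr : r.length ≤ n := by simp at hlen; omega
        by_cases hc : c = "#"
        · subst hc
          have hL : bfGo nums (nums.length : Int) ("#" :: r) 0 idx
              = bfGo nums (nums.length : Int) r 1 idx := by simp [bfGo]
          rw [hL, (ih r hlr hqr).2 idx 1 h0 hM (le_refl 1), pv_check_hash]
          have harith : (1 : Int) + (ctRunLen r : Int) = (ctRunLen r : Int) + 1 := by ring
          rw [harith]
        · have hcb : ¬ (c = "#" ∨ c = "?") := by tauto
          have hL : bfGo nums (nums.length : Int) (c :: r) 0 idx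
              = bfGo nums (nums.length : Int) r 0 idx := by simp [bfGo, hcb, hc, hc?]
          have hR : checkTranslation nums (c :: r) idx = checkTranslation nums r idx := by
            simp [checkTranslation, hc]
          rw [hL, hR]
          exact (ih r hlr hqr).1 idx h0 hM
    · intro idx run h0 hM hrun
      match rest with
      | [] => exact pv_nil2 nums idx run h0 hM hrun
      | c :: r =>
        have hc? : ¬ c = "?" := by
          intro hc; subst hc; simp [List.count_cons] at hq
        have hqr : r.count "?" = 0 := by
          simp only [List.count_cons] at hq; omega
        have hlr : r.length ≤ n := by simp at hlen; omega
        have hpos : run > 0 := by omega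
        by_cases hc : c = "#"
        · subst hc
          have hL : bfGo nums (nums.length : Int) ("#" :: r) run idx
              = bfGo nums (nums.length : Int) r (run + 1) idx := by simp [bfGo]
          rw [hL, (ih r hlr hqr).2 idx (run + 1) h0 hM (by omega)]
          have hct : ctRunLen ("#" :: r) = ctRunLen r + 1 := by simp [ctRunLen]
          rw [hct, List.drop_succ_cons]
          have harith : run + 1 + (ctRunLen r : Int) = run + ((ctRunLen r : Int) + 1) := by ring
          rw [harith]
          push_cast
          rfl
        · have hcb : ¬ (c = "#" ∨ c = "?") := by tauto
          have hct : ctRunLen (c :: r) = 0 := by simp [ctRunLen, hc]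
          have hL : bfGo nums (nums.length : Int) (c :: r) run idx
              = (if idx < (nums.length : Int) ∧ PySem.List.pyGetD nums idx 0 = run
                 then bfGo nums (nums.length : Int) r 0 (idx + 1) else 0) := by
            simp [bfGo, hcb, hc, hc?, hpos]
          have hR : checkTranslation nums (c :: r) (idx + 1) = checkTranslation nums r (idx + 1) := by
            simp [checkTranslation, hc]
          rw [hL, hct]
          simp only [List.drop_zero, Nat.cast_zero, add_zero, hR]
          by_cases h1 : idx = (nums.length : Int)
          · have hnlt : ¬ idx < (nums.length : Int) := by omega
            rw [if_pos h1, if_neg (fun hcon => hnlt hcon.1)]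
          · have hlt : idx < (nums.length : Int) := by omega
            rw [if_neg h1]
            by_cases hg : PySem.List.pyGetD nums idx 0 = run
            · rw [if_pos ⟨hlt, hg⟩, if_neg (not_not_intro hg.symm)]
              exact (ih r hlr hqr).1 (idx + 1) (by omega) (by omega)
            · rw [if_neg (fun hcon => hg hcon.2), if_pos (fun h => hg h.symm)]

theorem pv_split (nums : List Int) (m : Int) :
    ∀ record : List String, "?" ∈ record → ∀ run idx : Int,
      bfGo nums m record run idx
        = bfGo nums m (record.set (record.idxOf "?") "#") run idx
          + bfGo nums m (record.set (record.idxOf "?") ".") run idx := by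
  intro record
  induction record with
  | nil => intro h; cases h
  | cons c r ihr =>
    intro h run idx
    by_cases hc : c = "?"
    · subst hc
      rw [List.idxOf_cons_self, List.set_cons_zero, List.set_cons_zero]
      have hQ : bfGo nums m ("?" :: r) run idx
          = bfGo nums m r (run + 1) idx
            + (if run > 0 then
                 (if idx < m ∧ PySem.List.pyGetD nums idx 0 = run
                  then bfGo nums m r 0 (idx + 1) else 0)
               else bfGo nums m r 0 idx) := by simp [bfGo]
      have hH : bfGo nums m ("#" :: r) run idx = bfGo nums m r (run + 1) idx := by simp [bfGo]
      have hD : bfGo nums m ("." :: r) run idx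
          = (if run > 0 then
               (if idx < m ∧ PySem.List.pyGetD nums idx 0 = run
                then bfGo nums m r 0 (idx + 1) else 0)
             else bfGo nums m r 0 idx) := by simp [bfGo]
      rw [hQ, hH, hD]
    · have hm : "?" ∈ r := by
        cases h with
        | head => exact absurd rfl hc
        | tail _ h' => exact h'
      have hidx : (c :: r).idxOf "?" = r.idxOf "?" + 1 := by
        simp [List.idxOf_cons]
        have : (c == "?") = false := by simpa using hc
        simp [this]
      rw [hidx]
      simp only [List.set_cons_succ, bfGo]
      rw [ihr hm (run + 1) idx, ihr hm 0 (idx + 1), ihr hm 0 idx]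
      split_ifs <;> omega

theorem pv_main_aux (nums : List Int) :
    ∀ (k : Nat) (record : List String), record.count "?" ≤ k → bf record nums = bf_alt record nums := by
  intro k
  induction k with
  | zero =>
    intro record hk
    have hnm : ¬ "?" ∈ record := by
      intro h
      have := List.count_pos_iff.mpr h
      omega
    rw [bf]
    simp only [hnm, dif_neg, not_false_iff]
    rw [pv_alt_eq]
    have hq : record.count "?" = 0 := by omega
    rw [(pv_go_check nums record.length record (le_refl _) hq).1 0 (by omega) (by positivity)]
  | succ k ihk =>
    intro record hk
    by_cases h : "?" ∈ record
    · rw [bf]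
      simp only [h, dif_pos]
      have hlt1 := pv_count_set_lt record "#" (by decide) h
      have hlt2 := pv_count_set_lt record "." (by decide) h
      rw [ihk _ (by omega), ihk _ (by omega), pv_alt_eq, pv_alt_eq, pv_alt_eq]
      exact (pv_split nums (nums.length : Int) record h 0 0).symm
    · rw [bf]
      simp only [h, dif_neg, not_false_iff]
      rw [pv_alt_eq]
      have hq : record.count "?" = 0 := List.count_eq_zero.mpr h
      rw [(pv_go_check nums record.length record (le_refl _) hq).1 0 (by omega) (by positivity)]

theorem pv_main : ∀ (record : List String) (nums : List Int), bf record nums = bf_alt record nums := by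
  intro record nums
  exact pv_main_aux nums (record.count "?") record (le_refl _)

-- ===== VERDICT (by name: the statement is the Claim_ definition above) =====
theorem bf_spec : Claim_equal_bf := by
  intro record nums _
  unfold Spec_bf
  exact pv_main record nums
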